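-- pv_equiv track=rewrite | github.com/red-hat-data-services/pipelines-components | .github/scripts/validate_wheel.py | validate_init_files
-- ===== SOURCE A (Python) =====
-- from typing import List, Tuple
--
-- def validate_init_files(file_list: List[str], package_type: str = "core") -> Tuple[List[str], List[str]]:
--     """Validate the presence of __init__.py files and category structure."""
--     messages = []
--     errors = []
--
--     init_files = [f for f in file_list if f.endswith('__init__.py')]
--     if not init_files:
--         errors.append("Error: No __init__.py files found")
--         return messages, errors
--
--     messages.append(f"✓ Found {len(init_files)} __init__.py files")
--
--     # Check for category-level __init__.py files
--     expected_categories = ['training', 'evaluation', 'data_processing', 'deployment']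
--     for category in expected_categories:
--         if package_type == "third-party":
--             component_init = f"third_party/components/{category}/__init__.py"
--             pipeline_init = f"third_party/pipelines/{category}/__init__.py"
--         else:
--             component_init = f"kfp_components/components/{category}/__init__.py"
--             pipeline_init = f"kfp_components/pipelines/{category}/__init__.py"
--
--         found_component = any(component_init in f for f in init_files)
--         found_pipeline = any(pipeline_init in f for f in init_files)
--
--         if found_component or found_pipeline:
--             messages.append(f"  ✓ Found {category} category init files")
--
--     return messages, errors
-- ===== SOURCE B (Python) =====
-- from typing import List, Tuple
--
-- def validate_init_files(file_list: List[str], package_type: str = "core") -> Tuple[List[str], List[str]]: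
--     """Validate the presence of __init__.py files and category structure.
--
--     Single pass over init_files builds a found-categories set; messages are
--     then emitted in the fixed expected_categories order.
--     """
--     init_files = [f for f in file_list if f.endswith('__init__.py')]
--     if not init_files:
--         return [], ["Error: No __init__.py files found"]
--
--     expected_categories = ['training', 'evaluation', 'data_processing', 'deployment']
--     prefix = "third_party" if package_type == "third-party" else "kfp_components"
--
--     found = set()
--     for f in init_files:
--         for cat in expected_categories:
--             if cat in found:
--                 continue
--             if (f"{prefix}/components/{cat}/__init__.py" in f
--                     or f"{prefix}/pipelines/{cat}/__init__.py" in f):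
--                 found.add(cat)
--
--     messages = [f"✓ Found {len(init_files)} __init__.py files"]
--     for cat in expected_categories:
--         if cat in found:
--             messages.append(f"  ✓ Found {cat} category init files")
--     return messages, []
-- ===== Notes on version B (the rewrite author's own statement) =====
-- stated objective: alternative
-- what changed: B scans init_files once, collecting matching categories into a found-set, then emits the category messages in a separate ordered pass over expected_categories, with the prefix chosen once instead of per category inside the loop.
import Mathlib
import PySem

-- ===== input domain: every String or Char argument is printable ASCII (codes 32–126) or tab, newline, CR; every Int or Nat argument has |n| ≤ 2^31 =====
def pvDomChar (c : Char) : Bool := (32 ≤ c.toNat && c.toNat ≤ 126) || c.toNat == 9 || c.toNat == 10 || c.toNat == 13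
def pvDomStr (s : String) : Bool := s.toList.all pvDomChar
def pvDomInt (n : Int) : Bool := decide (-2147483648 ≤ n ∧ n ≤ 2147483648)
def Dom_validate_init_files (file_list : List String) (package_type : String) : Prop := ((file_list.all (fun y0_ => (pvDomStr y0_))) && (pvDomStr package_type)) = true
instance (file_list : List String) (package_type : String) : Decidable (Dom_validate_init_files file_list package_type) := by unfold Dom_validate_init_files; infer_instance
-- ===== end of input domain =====

-- B does the same job as A by a different decomposition: one pass over init_files builds a
-- found-categories set, then a second ordered pass over expected_categories emits the messages.

-- ===== PORT A =====
def validate_init_files (file_list : List String) (package_type : String) : List String × List String :=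
  let messages : List String := []
  let errors : List String := []
  let init_files := file_list.filter (fun f => PySem.Str.endswith f "__init__.py")
  if init_files = [] then
    (messages, errors ++ ["Error: No __init__.py files found"])
  else
    let messages := messages ++ ["✓ Found " ++ PySem.Int.toStr (init_files.length : Int) ++ " __init__.py files"]
    let expected_categories := ["training", "evaluation", "data_processing", "deployment"]
    let messages := expected_categories.foldl (fun msgs category =>
      let component_init :=
        if package_type = "third-party" then "third_party/components/" ++ category ++ "/__init__.py"
        else "kfp_components/components/" ++ category ++ "/__init__.py"
      let pipeline_init :=
        if package_type = "third-party" then "third_party/pipelines/" ++ category ++ "/__init__.py"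
        else "kfp_components/pipelines/" ++ category ++ "/__init__.py"
      let found_component := init_files.any (fun f => PySem.Str.isIn component_init f)
      let found_pipeline := init_files.any (fun f => PySem.Str.isIn pipeline_init f)
      if found_component || found_pipeline then
        msgs ++ ["  ✓ Found " ++ category ++ " category init files"]
      else msgs) messages
    (messages, errors)

-- ===== PORT B =====
def validate_init_files_alt (file_list : List String) (package_type : String) : List String × List String :=
  let init_files := file_list.filter (fun f => PySem.Str.endswith f "__init__.py")
  if init_files = [] then
    ([], ["Error: No __init__.py files found"])
  else
    let expected_categories := ["training", "evaluation", "data_processing", "deployment"]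
    let pre := if package_type = "third-party" then "third_party" else "kfp_components"
    let found : PySem.Set String := init_files.foldl (fun fnd f =>
      expected_categories.foldl (fun fnd cat =>
        if PySem.Set.contains fnd cat then fnd
        else if PySem.Str.isIn (pre ++ "/components/" ++ cat ++ "/__init__.py") f
               || PySem.Str.isIn (pre ++ "/pipelines/" ++ cat ++ "/__init__.py") f then
          PySem.Set.add fnd cat
        else fnd) fnd) PySem.Set.empty
    let messages := ["✓ Found " ++ PySem.Int.toStr (init_files.length : Int) ++ " __init__.py files"]
    let messages := expected_categories.foldl (fun msgs cat =>
      if PySem.Set.contains found cat then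
        msgs ++ ["  ✓ Found " ++ cat ++ " category init files"]
      else msgs) messages
    (messages, [])

-- ===== PRECONDITION & SPEC =====
def Spec_validate_init_files (file_list : List String) (package_type : String) (out : List String × List String) : Prop := out = validate_init_files_alt file_list package_type
instance (file_list : List String) (package_type : String) (out : List String × List String) : Decidable (Spec_validate_init_files file_list package_type out) := by unfold Spec_validate_init_files; infer_instance

-- ===== CLAIM (what is proved, stated in full; the proofs are below) =====
def Claim_equal_validate_init_files : Prop := ∀ (file_list : List String) (package_type : String), Dom_validate_init_files file_list package_type → Spec_validate_init_files file_list package_type (validate_init_files file_list package_type)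

-- ===== LEMMAS AND PROOFS =====

-- any distributes over ||
theorem pv_any_or {α : Type} (xs : List α) (p q : α → Bool) :
    xs.any (fun x => p x || q x) = (xs.any p || xs.any q) := by
  induction xs with
  | nil => rfl
  | cons a t ih =>
    simp only [List.any_cons, ih]
    cases p a <;> cases q a <;> simp

-- inner fold over categories for ONE file: membership afterwards
theorem pv_inner_mem (m : String → String → Bool) (cats : List String) (s : PySem.Set String)
    (cat : String) (f : String) :
    cat ∈ cats.foldl (fun fnd c =>
        if PySem.Set.contains fnd c then fnd
        else if m c f then PySem.Set.add fnd c else fnd) s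
      ↔ cat ∈ s ∨ (cat ∈ cats ∧ m cat f = true) := by
  induction cats generalizing s with
  | nil => simp
  | cons c t ih =>
    simp only [List.foldl_cons]
    by_cases hc : PySem.Set.contains s c
    · rw [if_pos hc, ih]
      have hcm : c ∈ s := (PySem.Set.contains_iff s c).mp hc
      simp only [List.mem_cons]
      constructor
      · rintro (h | ⟨h1, h2⟩)
        · exact Or.inl h
        · exact Or.inr ⟨Or.inr h1, h2⟩
      · rintro (h | ⟨rfl | h1, h2⟩)
        · exact Or.inl h
        · exact Or.inl hcm
        · exact Or.inr ⟨h1, h2⟩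
    · rw [if_neg hc]
      by_cases hm : m c f = true
      · rw [if_pos hm, ih]
        simp only [PySem.Set.mem_add, List.mem_cons]
        constructor
        · rintro ((h | rfl) | ⟨h1, h2⟩)
          · exact Or.inl h
          · exact Or.inr ⟨Or.inl rfl, hm⟩
          · exact Or.inr ⟨Or.inr h1, h2⟩
        · rintro (h | ⟨rfl | h1, h2⟩)
          · exact Or.inl (Or.inl h)
          · exact Or.inl (Or.inr rfl)
          · exact Or.inr ⟨h1, h2⟩
      · rw [if_neg hm, ih]
        simp only [List.mem_cons]
        constructor
        · rintro (h | ⟨h1, h2⟩)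
          · exact Or.inl h
          · exact Or.inr ⟨Or.inr h1, h2⟩
        · rintro (h | ⟨rfl | h1, h2⟩)
          · exact Or.inl h
          · exact absurd h2 hm
          · exact Or.inr ⟨h1, h2⟩

-- outer fold over the files
theorem pv_outer_mem (m : String → String → Bool) (cats : List String) (files : List String)
    (s : PySem.Set String) (cat : String) :
    cat ∈ files.foldl (fun fnd f =>
        cats.foldl (fun fnd c =>
          if PySem.Set.contains fnd c then fnd
          else if m c f then PySem.Set.add fnd c else fnd) fnd) s
      ↔ cat ∈ s ∨ (cat ∈ cats ∧ ∃ f ∈ files, m cat f = true) := by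
  induction files generalizing s with
  | nil => simp
  | cons f t ih =>
    simp only [List.foldl_cons, ih, pv_inner_mem, List.mem_cons]
    constructor
    · rintro ((h | ⟨h1, h2⟩) | ⟨h1, g, hg1, hg2⟩)
      · exact Or.inl h
      · exact Or.inr ⟨h1, f, Or.inl rfl, h2⟩
      · exact Or.inr ⟨h1, g, Or.inr hg1, hg2⟩
    · rintro (h | ⟨h1, g, (rfl | hg), hg2⟩)
      · exact Or.inl (Or.inl h)
      · exact Or.inl (Or.inr ⟨h1, hg2⟩)
      · exact Or.inr ⟨h1, g, hg, hg2⟩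

-- literal-prefix concatenations of the two pattern heads
theorem pv_pre_tc : "third_party" ++ "/components/" = "third_party/components/" := by decide
theorem pv_pre_tp : "third_party" ++ "/pipelines/" = "third_party/pipelines/" := by decide
theorem pv_pre_kc : "kfp_components" ++ "/components/" = "kfp_components/components/" := by decide
theorem pv_pre_kp : "kfp_components" ++ "/pipelines/" = "kfp_components/pipelines/" := by decide

-- ===== VERDICT (by name: the statement is the Claim_ definition above) =====
theorem validate_init_files_spec : Claim_equal_validate_init_files := by
  intro file_list package_type _
  show _ = _
  unfold validate_init_files validate_init_files_alt
  set init_files := file_list.filter (fun f => PySem.Str.endswith f "__init__.py") with hif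
  by_cases h0 : init_files = []
  · simp [h0]
  · simp only [h0, if_false, List.nil_append]
    congr 1
    refine PySem.List.foldl_congr_mem _ _ _ _ ?_
    intro acc cat hcat
    have key : ∀ (cc pp : String),
        ((init_files.any (fun f => PySem.Str.isIn (cc ++ cat ++ "/__init__.py") f) ||
          init_files.any (fun f => PySem.Str.isIn (pp ++ cat ++ "/__init__.py") f)) = true)
        ↔ ∃ f ∈ init_files,
            (PySem.Str.isIn (cc ++ cat ++ "/__init__.py") f ||
             PySem.Str.isIn (pp ++ cat ++ "/__init__.py") f) = true := by
      intro cc pp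
      rw [← pv_any_or, List.any_eq_true]
    by_cases hp : package_type = "third-party"
    · subst hp
      simp only [reduceIte, pv_pre_tc, pv_pre_tp]
      have hkey :
          ((init_files.any fun f => PySem.Str.isIn ("third_party/components/" ++ cat ++ "/__init__.py") f) ||
           (init_files.any fun f => PySem.Str.isIn ("third_party/pipelines/" ++ cat ++ "/__init__.py") f))
          = PySem.Set.contains
              (init_files.foldl (fun fnd f =>
                (["training", "evaluation", "data_processing", "deployment"]).foldl (fun fnd c =>
                  if PySem.Set.contains fnd c then fnd
                  else if PySem.Str.isIn ("third_party/components/" ++ c ++ "/__init__.py") f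
                        || PySem.Str.isIn ("third_party/pipelines/" ++ c ++ "/__init__.py") f then
                    PySem.Set.add fnd c
                  else fnd) fnd) PySem.Set.empty) cat := by
        rw [Bool.eq_iff_iff, key, PySem.Set.contains_iff, pv_outer_mem]
        simp only [PySem.Set.empty, List.not_mem_nil, false_or]
        exact ⟨fun h => ⟨hcat, h⟩, fun h => h.2⟩
      rw [hkey]
    · simp only [eq_false hp, reduceIte, pv_pre_kc, pv_pre_kp]
      have hkey :
          ((init_files.any fun f => PySem.Str.isIn ("kfp_components/components/" ++ cat ++ "/__init__.py") f) ||
           (init_files.any fun f => PySem.Str.isIn ("kfp_components/pipelines/" ++ cat ++ "/__init__.py") f))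
          = PySem.Set.contains
              (init_files.foldl (fun fnd f =>
                (["training", "evaluation", "data_processing", "deployment"]).foldl (fun fnd c =>
                  if PySem.Set.contains fnd c then fnd
                  else if PySem.Str.isIn ("kfp_components/components/" ++ c ++ "/__init__.py") f
                        || PySem.Str.isIn ("kfp_components/pipelines/" ++ c ++ "/__init__.py") f then
                    PySem.Set.add fnd c
                  else fnd) fnd) PySem.Set.empty) cat := by
        rw [Bool.eq_iff_iff, key, PySem.Set.contains_iff, pv_outer_mem]
        simp only [PySem.Set.empty, List.not_mem_nil, false_or]
        exact ⟨fun h => ⟨hcat, h⟩, fun h => h.2⟩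
      rw [hkey]
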